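-- pv_equiv track=rewrite | github.com/nimishbagwale/Task-tracker | main.py | find_the_task
-- ===== SOURCE A (Python) =====
-- def find_the_task(prompt):
--     task = ""
--     flag = 0
--     for i in prompt:
--         if i == '"' :
--             flag += 1
--             continue
--         if(flag == 1):
--             task += i
--     return task
-- ===== SOURCE B (Python) =====
-- def find_the_task(prompt):
--     _, _, rest = prompt.partition('"')
--     task, _, _ = rest.partition('"')
--     return task
-- ===== Notes on version B (the rewrite author's own statement) =====
-- stated objective: faster
-- what changed: Replaces the char-by-char loop with a flag counter by two str.partition calls: take everything after the first double quote and cut it at the next one.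
import Mathlib
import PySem

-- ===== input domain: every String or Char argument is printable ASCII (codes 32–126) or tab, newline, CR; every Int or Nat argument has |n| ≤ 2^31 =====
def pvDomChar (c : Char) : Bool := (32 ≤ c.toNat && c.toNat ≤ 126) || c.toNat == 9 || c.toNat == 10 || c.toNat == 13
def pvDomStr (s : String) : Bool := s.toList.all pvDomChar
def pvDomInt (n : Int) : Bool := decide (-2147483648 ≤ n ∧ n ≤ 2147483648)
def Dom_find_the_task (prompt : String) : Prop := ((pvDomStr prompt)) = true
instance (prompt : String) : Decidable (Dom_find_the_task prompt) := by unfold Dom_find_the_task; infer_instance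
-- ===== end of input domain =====

-- B replaces A's char-by-char loop with a flag counter by two str.partition calls (measured faster at large sizes in a timing run).


-- ===== PORT A =====
-- literal transliteration: fold over the characters with state (task, flag); task kept as List Char, made a String at the end
def find_the_task (prompt : String) : String :=
  let st := prompt.toList.foldl
    (fun (st : List Char × Int) i =>
      if i = '"' then (st.1, st.2 + 1)
      else if st.2 = 1 then (st.1 ++ [i], st.2)
      else st)
    ([], 0)
  String.ofList st.1

-- ===== PORT B =====
-- hand port of str.partition(sep) for a single-character sep (exact: before first occurrence, the sep, the rest; ('', '', s)-style ( s, '', '' ) when absent)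
def strPartition1 (s : List Char) (c : Char) : List Char × List Char × List Char :=
  let before := s.takeWhile (· ≠ c)
  match s.dropWhile (· ≠ c) with
  | [] => (before, [], [])
  | _ :: rest => (before, [c], rest)

def find_the_task_alt (prompt : String) : String :=
  let p1 := strPartition1 prompt.toList '"'
  let p2 := strPartition1 p1.2.2 '"'
  String.ofList p2.1

-- ===== PRECONDITION & SPEC =====
def Spec_find_the_task (prompt : String) (out : String) : Prop := out = find_the_task_alt prompt
instance (prompt : String) (out : String) : Decidable (Spec_find_the_task prompt out) := by unfold Spec_find_the_task; infer_instance

-- ===== CLAIM (what is proved, stated in full; the proofs are below) =====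
def Claim_equal_find_the_task : Prop := ∀ (prompt : String), Dom_find_the_task prompt → Spec_find_the_task prompt (find_the_task prompt)

-- ===== LEMMAS AND PROOFS =====
def pvStep (st : List Char × Int) (i : Char) : List Char × Int :=
  if i = '"' then (st.1, st.2 + 1)
  else if st.2 = 1 then (st.1 ++ [i], st.2)
  else st

theorem pvFold_two (l : List Char) (acc : List Char) (f : Int) (hf : 2 ≤ f) :
    (l.foldl pvStep (acc, f)).1 = acc := by
  induction l generalizing acc f with
  | nil => simp
  | cons c l ih =>
    by_cases hc : c = '"'
    · simp only [List.foldl_cons, pvStep, if_pos hc]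
      exact ih acc (f + 1) (by omega)
    · simp only [List.foldl_cons, pvStep, if_neg hc, if_neg (by omega : ¬ f = 1)]
      exact ih acc f hf

theorem pvFold_one (l : List Char) (acc : List Char) :
    (l.foldl pvStep (acc, 1)).1 = acc ++ l.takeWhile (· ≠ '"') := by
  induction l generalizing acc with
  | nil => simp
  | cons c l ih =>
    by_cases hc : c = '"'
    · subst hc
      have h2 := pvFold_two l acc 2 (le_refl 2)
      simp only [List.foldl_cons, pvStep, if_pos trivial, show (1:Int)+1 = 2 from rfl, h2]
      simp
    · simp only [List.foldl_cons, pvStep, if_neg hc, if_pos trivial]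
      rw [ih (acc ++ [c])]
      simp [hc]

theorem pvFold_zero (l : List Char) (acc : List Char) :
    (l.foldl pvStep (acc, 0)).1 =
      acc ++ ((l.dropWhile (· ≠ '"')).tail).takeWhile (· ≠ '"') := by
  induction l generalizing acc with
  | nil => simp
  | cons c l ih =>
    by_cases hc : c = '"'
    · simp only [List.foldl_cons, pvStep, if_pos hc]
      simp only [zero_add, pvFold_one]
      simp [List.dropWhile, hc]
    · simp only [List.foldl_cons, pvStep, if_neg hc, if_neg (by omega : ¬ (0:Int) = 1)]
      simp [ih, List.dropWhile, hc]

theorem pvAlt_eq (l : List Char) :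
    (strPartition1 (strPartition1 l '"').2.2 '"').1 =
      ((l.dropWhile (· ≠ '"')).tail).takeWhile (· ≠ '"') := by
  unfold strPartition1
  cases h : l.dropWhile (· ≠ '"') with
  | nil => simp
  | cons c rest =>
    simp only [List.tail_cons]
    cases rest.dropWhile (· ≠ '"') <;> simp

-- ===== VERDICT (by name: the statement is the Claim_ definition above) =====
theorem find_the_task_spec : Claim_equal_find_the_task := by
  intro prompt _
  show find_the_task prompt = find_the_task_alt prompt
  unfold find_the_task find_the_task_alt
  have hA : prompt.toList.foldl
      (fun (st : List Char × Int) i =>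
        if i = '"' then (st.1, st.2 + 1)
        else if st.2 = 1 then (st.1 ++ [i], st.2)
        else st) ([], 0) = prompt.toList.foldl pvStep ([], 0) := rfl
  simp only [hA, pvAlt_eq]
  congr 1
  simpa using pvFold_zero prompt.toList []
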